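-- pv_equiv track=rewrite | github.com/kimchsi90/chansik | online_test/에너자이_4번.py | solution
-- ===== SOURCE A (Python) =====
-- def solution(num_cards, num_picked_cards, A_cards):
--     sum_a = 0 # 철수의 점수
--     sum_b = 0 # 영희의 점수
--     num_picked_cards -= num_cards # 영희의 카드 초기화 수 만큼 남은 카드를 뺀다
--
--     for i in range(num_cards - 1, -1, -1): # 카드 역순으로 i = 2, 1, 0
--         if num_picked_cards >= A_cards[i]:
--             num_picked_cards -= A_cards[i]
--             sum_b += i+1
--         else:
--             sum_a += i+1
--
--     return sum_b - sum_a if sum_a < sum_b else -1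
-- ===== SOURCE B (Python) =====
-- def solution(num_cards, num_picked_cards, A_cards):
--     # pair each card's point value with its cost, in deck order (top of deck = last)
--     deck = list(zip(range(1, num_cards + 1), A_cards))
--     budget = num_picked_cards - num_cards
--     sum_b = 0
--     while deck:
--         score, cost = deck.pop()
--         if budget >= cost:
--             budget -= cost
--             sum_b += score
--     sum_a = num_cards * (num_cards + 1) // 2 - sum_b
--     return sum_b - sum_a if sum_a < sum_b else -1
-- ===== Notes on version B (the rewrite author's own statement) =====
-- stated objective: alternative
-- what changed: B replaces A's reverse index loop with two accumulators by a different data structure and traversal: it zips each card's point value with its cost into an explicit deck list, consumes it with a destructive while/pop loop (no indexing, no range), tracks only the winner-side sum, and recovers the opponent's score from the closed-form total n(n+1)//2.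
import Mathlib
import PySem

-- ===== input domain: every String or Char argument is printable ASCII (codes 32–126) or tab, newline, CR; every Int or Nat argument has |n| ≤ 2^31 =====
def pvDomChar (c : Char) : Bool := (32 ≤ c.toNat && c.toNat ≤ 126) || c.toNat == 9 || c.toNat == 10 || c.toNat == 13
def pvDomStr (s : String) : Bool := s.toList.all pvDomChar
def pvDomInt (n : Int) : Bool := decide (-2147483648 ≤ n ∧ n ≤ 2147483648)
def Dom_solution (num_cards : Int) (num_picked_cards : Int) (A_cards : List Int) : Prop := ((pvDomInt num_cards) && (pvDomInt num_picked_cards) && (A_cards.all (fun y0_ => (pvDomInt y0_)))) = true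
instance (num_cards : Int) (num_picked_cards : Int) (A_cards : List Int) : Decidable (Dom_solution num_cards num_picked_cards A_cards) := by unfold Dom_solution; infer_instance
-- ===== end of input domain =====

-- B replaces A's reverse index loop with an explicit zipped (score, cost) deck consumed by a
-- while/pop loop tracking one accumulator; the other score comes from the total n(n+1)//2.


-- ===== PORT A =====
-- loop body of A: state (sum_a, sum_b, num_picked_cards); the 'none' branch of pyGet?
-- (Python's IndexError) is unreachable under Pre_solution and leaves the state unchanged
def solStepA (A_cards : List Int) (s : Int × Int × Int) (i : Int) : Int × Int × Int :=
  match PySem.List.pyGet? A_cards i with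
  | some v => if s.2.2 ≥ v then (s.1, s.2.1 + (i + 1), s.2.2 - v) else (s.1 + (i + 1), s.2.1, s.2.2)
  | none => s

def solution (num_cards : Int) (num_picked_cards : Int) (A_cards : List Int) : Int :=
  let st := (PySem.List.pyRange (num_cards - 1) (-1) (-1)).foldl (solStepA A_cards)
              (0, 0, num_picked_cards - num_cards)
  if st.1 < st.2.1 then st.2.1 - st.1 else -1

-- ===== PORT B =====
-- body of B's 'while deck: score, cost = deck.pop(); …' — pop() yields the deck back to front,
-- so the while loop is a foldl over deck.reverse with state (sum_b, budget)
def solPopB (s : Int × Int) (card : Int × Int) : Int × Int :=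
  if s.2 ≥ card.2 then (s.1 + card.1, s.2 - card.2) else s

def solution_alt (num_cards : Int) (num_picked_cards : Int) (A_cards : List Int) : Int :=
  let deck := (PySem.List.pyRange 1 (num_cards + 1) 1).zip A_cards
  let st := deck.reverse.foldl solPopB (0, num_picked_cards - num_cards)
  let sum_a := PySem.Int.floordiv (num_cards * (num_cards + 1)) 2 - st.1
  if sum_a < st.1 then st.1 - sum_a else -1

-- ===== PRECONDITION & SPEC =====
-- A raises IndexError exactly when num_cards > len(A_cards); that is all Pre_ excludes.
def Pre_solution (num_cards : Int) (num_picked_cards : Int) (A_cards : List Int) : Prop :=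
  num_cards ≤ A_cards.length
instance (num_cards : Int) (num_picked_cards : Int) (A_cards : List Int) : Decidable (Pre_solution num_cards num_picked_cards A_cards) := by unfold Pre_solution; infer_instance
def pvWitness_solution : Int × Int × List Int := (3, 8, [2, 1, 3])

def Spec_solution (num_cards : Int) (num_picked_cards : Int) (A_cards : List Int) (out : Int) : Prop := out = solution_alt num_cards num_picked_cards A_cards
instance (num_cards : Int) (num_picked_cards : Int) (A_cards : List Int) (out : Int) : Decidable (Spec_solution num_cards num_picked_cards A_cards out) := by unfold Spec_solution; infer_instance

-- ===== CLAIM (what is proved, stated in full; the proofs are below) =====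
def Claim_equal_solution : Prop := ∀ (num_cards : Int) (num_picked_cards : Int) (A_cards : List Int), Dom_solution num_cards num_picked_cards A_cards → Pre_solution num_cards num_picked_cards A_cards → Spec_solution num_cards num_picked_cards A_cards (solution num_cards num_picked_cards A_cards)

-- ===== LEMMAS AND PROOFS =====

-- A's fold over a list of in-range indices relates to B's fold over the corresponding
-- (score, cost) pairs: the (sum_b, budget) components coincide, and sum_a + sum_b grows
-- by i+1 at every index.
lemma fold_rel (A : List Int) : ∀ (r : List Int),
    (∀ i ∈ r, (PySem.List.pyGet? A i).isSome) → ∀ sa sb bud,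
    (r.foldl (solStepA A) (sa, sb, bud)).2
      = (r.map (fun i => (i + 1, (PySem.List.pyGet? A i).getD 0))).foldl solPopB (sb, bud) ∧
    (r.foldl (solStepA A) (sa, sb, bud)).1 + (r.foldl (solStepA A) (sa, sb, bud)).2.1
      = sa + sb + (r.map (· + 1)).sum := by
  intro r
  induction r with
  | nil => intro _ sa sb bud; simp
  | cons i r ih =>
    intro h sa sb bud
    obtain ⟨v, hv⟩ := Option.isSome_iff_exists.mp (h i (by simp))
    have ht := ih (fun j hj => h j (by simp [hj]))
    by_cases hc : bud ≥ v
    · simp only [List.foldl_cons, solStepA, solPopB, hv, Option.getD_some, if_pos hc,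
        List.map_cons, List.sum_cons]
      refine ⟨(ht sa (sb + (i + 1)) (bud - v)).1, ?_⟩
      have := (ht sa (sb + (i + 1)) (bud - v)).2
      omega
    · simp only [List.foldl_cons, solStepA, solPopB, hv, Option.getD_some, if_neg hc,
        List.map_cons, List.sum_cons]
      refine ⟨(ht (sa + (i + 1)) sb bud).1, ?_⟩
      have := (ht (sa + (i + 1)) sb bud).2
      omega

-- B's reversed zipped deck IS A's countdown index sequence mapped to (score, cost) pairs
lemma deck_eq (n : Int) (A : List Int) (hlen : n ≤ A.length) :
    ((PySem.List.pyRange 1 (n + 1) 1).zip A).reverse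
      = (PySem.List.pyRange (n - 1) (-1) (-1)).map
          (fun i => (i + 1, (PySem.List.pyGet? A i).getD 0)) := by
  rw [PySem.List.pyRange_neg_one_eq_reverse]
  have h0 : (-1 : Int) + 1 = 0 := by norm_num
  have h1 : (n - 1 + 1) = n := by ring
  rw [h0, h1, List.map_reverse]
  congr 1
  apply List.ext_getElem
  · simp [PySem.List.length_pyRange_one]; omega
  · intro k h1 h2
    have hk : (k : Int) < n := by
      have := h1; simp [PySem.List.length_pyRange_one] at this; omega
    have hkA : k < A.length := by omega
    simp only [List.getElem_zip, List.getElem_map, PySem.List.getElem_pyRange_one]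
    have hg : PySem.List.pyGet? A (0 + (k : Int)) = some A[k] := by
      rw [show (0 + (k : Int)) = ((k : Nat) : Int) by simp, PySem.List.pyGet?_natCast]
      simp [hkA]
    rw [hg, Option.getD_some]
    simp only [Prod.mk.injEq]
    exact ⟨by ring, trivial⟩

-- twice the sum of i+1 over the countdown range n-1 … 0 is n*(n+1)
lemma two_sum_range (n : Int) (hn : 0 ≤ n) :
    2 * ((PySem.List.pyRange (n - 1) (-1) (-1)).map (· + 1)).sum = n * (n + 1) := by
  rw [PySem.List.pyRange_neg_one]
  have h1 : (n - 1 - (-1)).toNat = n.toNat := by omega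
  rw [h1]
  have key : ∀ m : ℕ, 2 * (((List.range m).map (fun k : ℕ => n - 1 - (k : Int))).map (· + 1)).sum
      = (m : Int) * (2 * n - (m : Int) + 1) := by
    intro m
    induction m with
    | zero => simp
    | succ m ih =>
      rw [List.range_succ]
      simp only [List.map_append, List.sum_append, List.map_cons, List.map_nil, List.sum_cons,
        List.sum_nil]
      push_cast
      push_cast at ih
      linarith
  have := key n.toNat
  have h2 : (n.toNat : Int) = n := by omega
  rw [h2] at this
  rw [this]; ring

lemma floordiv_two_mul (s : Int) : PySem.Int.floordiv (2 * s) 2 = s := by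
  rw [PySem.Int.floordiv_eq_ediv_of_pos (by norm_num)]
  omega

-- ===== VERDICT (by name: the statement is the Claim_ definition above) =====
theorem solution_spec : Claim_equal_solution := by
  intro n p cards _ hpre
  unfold Spec_solution
  simp only [solution, solution_alt]
  by_cases hn : 0 ≤ n
  · have hsome : ∀ i ∈ PySem.List.pyRange (n - 1) (-1) (-1),
        (PySem.List.pyGet? cards i).isSome := by
      intro i hi
      rw [PySem.List.mem_pyRange_neg_one] at hi
      rw [Option.isSome_iff_ne_none]
      intro hnone
      rw [PySem.List.pyGet?_eq_none_iff] at hnone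
      apply hnone
      simp only [PySem.Raise.InRange]
      unfold Pre_solution at hpre
      omega
    obtain ⟨h1, h2⟩ := fold_rel cards _ hsome 0 0 (p - n)
    rw [deck_eq n cards (by exact_mod_cast hpre)]
    set stA := (PySem.List.pyRange (n - 1) (-1) (-1)).foldl (solStepA cards) (0, 0, p - n) with hA
    set stB := ((PySem.List.pyRange (n - 1) (-1) (-1)).map
        (fun i => (i + 1, (PySem.List.pyGet? cards i).getD 0))).foldl solPopB (0, p - n) with hB
    have hsb : stA.2.1 = stB.1 := by rw [h1]
    have hsum : stA.1 + stA.2.1 = ((PySem.List.pyRange (n - 1) (-1) (-1)).map (· + 1)).sum := by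
      omega
    have htot : PySem.Int.floordiv (n * (n + 1)) 2 = stA.1 + stA.2.1 := by
      rw [hsum, ← two_sum_range n hn, floordiv_two_mul]
    simp only [htot, ← hsb]
    by_cases hc : stA.1 < stA.2.1
    · rw [if_pos hc, if_pos (by omega)]; omega
    · rw [if_neg hc, if_neg (by omega)]
  · have hnil : PySem.List.pyRange (n - 1) (-1) (-1) = [] :=
      PySem.List.pyRange_neg_one_eq_nil (by omega)
    have hnil2 : PySem.List.pyRange 1 (n + 1) 1 = [] :=
      PySem.List.pyRange_one_eq_nil (by omega)
    rw [hnil, hnil2]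
    simp only [List.zip_nil_left, List.reverse_nil, List.foldl_nil]
    have htot : 0 ≤ PySem.Int.floordiv (n * (n + 1)) 2 := by
      rw [PySem.Int.floordiv_eq_ediv_of_pos (by norm_num)]
      exact Int.ediv_nonneg (by nlinarith) (by norm_num)
    rw [if_neg (by omega), if_neg (by omega)]
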